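-- pv_equiv track=rewrite | github.com/SherMM/programming-interview-questions | arrays/dutch_flag.py | get_pivot_lo_hi_index
-- ===== SOURCE A (Python) =====
-- def get_pivot_lo_hi_index(numbers, pivot):
--     """
--     Returns index of first and last pivot
--     occurrence
--
--     Args:
--         numbers (list[int]): list of integers
--         pivot (int): pivot value
--
--     Returns:
--         (lo, hi): indices of first and last
--             pivot value occurrences
--     """
--     lo, hi = None, None
--     for i, value in enumerate(numbers):
--         if value == pivot:
--             if lo is None:
--                 lo, hi = i, i
--             else:
--                 hi += 1
--     return lo, hi
-- ===== SOURCE B (Python) =====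
-- def get_pivot_lo_hi_index(numbers, pivot):
--     count = numbers.count(pivot)
--     if count == 0:
--         return (None, None)
--     lo = numbers.index(pivot)
--     return (lo, lo + count - 1)
-- ===== Notes on version B (the rewrite author's own statement) =====
-- stated objective: simpler
-- what changed: Replaces A's single stateful scan maintaining (lo, hi) with two library queries (count and first index) and the closed-form hi = lo + count - 1.
import Mathlib
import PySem

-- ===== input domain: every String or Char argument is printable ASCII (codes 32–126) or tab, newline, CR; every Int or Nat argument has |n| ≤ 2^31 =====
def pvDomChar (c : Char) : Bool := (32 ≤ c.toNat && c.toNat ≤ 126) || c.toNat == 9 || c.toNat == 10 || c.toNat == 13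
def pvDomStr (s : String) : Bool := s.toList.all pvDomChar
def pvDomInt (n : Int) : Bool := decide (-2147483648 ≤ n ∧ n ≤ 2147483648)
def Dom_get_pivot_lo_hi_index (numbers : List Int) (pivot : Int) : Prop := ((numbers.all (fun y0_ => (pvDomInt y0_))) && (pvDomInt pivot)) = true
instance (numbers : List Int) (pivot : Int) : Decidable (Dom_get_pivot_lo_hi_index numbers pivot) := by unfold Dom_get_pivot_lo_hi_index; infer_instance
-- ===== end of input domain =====

-- B replaces A's single stateful (lo, hi) scan with two library queries (count, first index)
-- and the closed-form hi = lo + count - 1; same values everywhere (objective: simpler).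

-- ===== PORT A =====
-- A: one pass over enumerate(numbers), maintaining (lo, hi); hi += 1 on each later occurrence.
def get_pivot_lo_hi_index (numbers : List Int) (pivot : Int) : Option Int × Option Int :=
  (PySem.List.enumerate numbers 0).foldl
    (fun (st : Option Int × Option Int) (p : Int × Int) =>
      if p.2 = pivot then
        match st.1 with
        | none => (some p.1, some p.1)
        | some lo => (some lo, st.2.map (· + 1))
      else st)
    (none, none)

-- ===== PORT B =====
-- B: count = numbers.count(pivot); if 0 → (None, None); else lo = numbers.index(pivot), hi = lo + count - 1.
-- The 'none' branch of index? is unreachable (count ≠ 0 ⇒ pivot ∈ numbers; Python's .index cannot raise there).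
def get_pivot_lo_hi_index_alt (numbers : List Int) (pivot : Int) : Option Int × Option Int :=
  let count : Int := (PySem.List.count numbers pivot : Int)
  if count = 0 then (none, none)
  else
    match PySem.List.index? numbers pivot with
    | none => (none, none)
    | some lo => (some (lo : Int), some ((lo : Int) + count - 1))

-- ===== PRECONDITION & SPEC =====
def Spec_get_pivot_lo_hi_index (numbers : List Int) (pivot : Int) (out : Option Int × Option Int) : Prop := out = get_pivot_lo_hi_index_alt numbers pivot
instance (numbers : List Int) (pivot : Int) (out : Option Int × Option Int) : Decidable (Spec_get_pivot_lo_hi_index numbers pivot out) := by unfold Spec_get_pivot_lo_hi_index; infer_instance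

-- ===== CLAIM (what is proved, stated in full; the proofs are below) =====
def Claim_equal_get_pivot_lo_hi_index : Prop := ∀ (numbers : List Int) (pivot : Int), Dom_get_pivot_lo_hi_index numbers pivot → Spec_get_pivot_lo_hi_index numbers pivot (get_pivot_lo_hi_index numbers pivot)

-- ===== LEMMAS AND PROOFS =====

-- PySem.List.count over a cons, phrased with an explicit if.
theorem count_cons_pysem (x pivot : Int) (xs : List Int) :
    PySem.List.count (x :: xs) pivot
      = PySem.List.count xs pivot + (if x = pivot then 1 else 0) := by
  rw [PySem.List.count_eq, PySem.List.count_eq, List.count_cons]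
  by_cases hx : x = pivot
  · subst hx; simp
  · have hx' : ¬ (pivot = x) := fun h => hx h.symm
    simp [beq_iff_eq]

-- A's fold after lo is set: every later occurrence adds 1 to hi, so it adds the count of the rest.
theorem foldA_some (pivot : Int) : ∀ (l : List Int) (s lo hi : Int),
    (PySem.List.enumerate l s).foldl
      (fun (st : Option Int × Option Int) (p : Int × Int) =>
        if p.2 = pivot then
          match st.1 with
          | none => (some p.1, some p.1)
          | some lo => (some lo, st.2.map (· + 1))
        else st)
      (some lo, some hi)
    = (some lo, some (hi + (PySem.List.count l pivot : Int))) := by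
  intro l
  induction l with
  | nil => intro s lo hi; simp [PySem.List.enumerate_nil, PySem.List.count]
  | cons x xs ih =>
    intro s lo hi
    rw [PySem.List.enumerate_cons, List.foldl_cons, count_cons_pysem]
    by_cases hx : x = pivot
    · simp only [hx, if_true, Option.map_some]
      rw [ih]
      push_cast; ring_nf
    · simp only [if_neg hx]
      rw [ih]
      push_cast; ring_nf

-- A's whole fold, characterised by first index and count (offset s).
theorem foldA_none (pivot : Int) : ∀ (l : List Int) (s : Int),
    (PySem.List.enumerate l s).foldl
      (fun (st : Option Int × Option Int) (p : Int × Int) =>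
        if p.2 = pivot then
          match st.1 with
          | none => (some p.1, some p.1)
          | some lo => (some lo, st.2.map (· + 1))
        else st)
      (none, none)
    = (match PySem.List.index? l pivot with
       | none => (none, none)
       | some lo => (some ((lo : Int) + s), some ((lo : Int) + s + (PySem.List.count l pivot : Int) - 1))) := by
  intro l
  induction l with
  | nil => intro s; simp [PySem.List.enumerate_nil, PySem.List.index?]
  | cons x xs ih =>
    intro s
    rw [PySem.List.enumerate_cons, List.foldl_cons]
    by_cases hx : x = pivot
    · simp only [hx, if_true]
      rw [foldA_some pivot xs (s + 1) s s]
      rw [PySem.List.index?_cons_self, count_cons_pysem, if_pos rfl]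
      simp [Prod.ext_iff]; omega
    · simp only [if_neg hx]
      rw [ih (s + 1)]
      rw [PySem.List.index?_cons_of_ne _ hx, count_cons_pysem, if_neg hx]
      cases h : PySem.List.index? xs pivot with
      | none => simp
      | some lo => simp [Prod.ext_iff]; omega

-- count = 0 iff index? = none (pivot absent).
theorem count_zero_iff_index_none (l : List Int) (pivot : Int) :
    PySem.List.count l pivot = 0 ↔ PySem.List.index? l pivot = none := by
  rw [PySem.List.index?_eq_none_iff, PySem.List.count_eq, List.count_eq_zero]

-- ===== VERDICT (by name: the statement is the Claim_ definition above) =====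
theorem get_pivot_lo_hi_index_spec : Claim_equal_get_pivot_lo_hi_index := by
  intro numbers pivot _
  unfold Spec_get_pivot_lo_hi_index get_pivot_lo_hi_index get_pivot_lo_hi_index_alt
  rw [foldA_none pivot numbers 0]
  cases h : PySem.List.index? numbers pivot with
  | none =>
    have hc : ((PySem.List.count numbers pivot : Int)) = 0 := by
      exact_mod_cast (count_zero_iff_index_none _ _).mpr h
    simp
  | some lo =>
    have hc : PySem.List.count numbers pivot ≠ 0 := by
      intro h0
      rw [(count_zero_iff_index_none _ _).mp h0] at h
      simp at h
    have hc' : ((PySem.List.count numbers pivot : Int)) ≠ 0 := by exact_mod_cast hc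
    simp only [if_neg hc']
    norm_num
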